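-- pv_equiv track=rewrite | github.com/nguyenluunhatminh02/LEARNING | python/python_exercises_29_advanced.py | graph_path_with_cycle
-- ===== SOURCE A (Python) =====
-- def graph_path_with_cycle(graph, start, end):
--     visited = set()
--     path = []
--
--     def dfs(node):
--         if node == end:
--             path.append(node)
--             return True
--
--         if node in visited:
--             return False
--
--         visited.add(node)
--         path.append(node)
--
--         for neighbor in graph.get(node, []):
--             if dfs(neighbor):
--                 return True
--
--         path.pop()
--         visited.remove(node)
--         return False
--
--     if dfs(start):
--         return path
--     return None
-- ===== SOURCE B (Python) =====
-- def graph_path_with_cycle(graph, start, end):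
--     # Purely functional DFS: path is built back-to-front from return values,
--     # ancestors is a persistent set passed down (no mutation/backtracking).
--     def dfs(node, ancestors):
--         if node == end:
--             return [node]
--         if node in ancestors:
--             return None
--         anc = ancestors | frozenset([node])
--         for neighbor in graph.get(node, []):
--             r = dfs(neighbor, anc)
--             if r is not None:
--                 return [node] + r
--         return None
--     return dfs(start, frozenset())
-- ===== Notes on version B (the rewrite author's own statement) =====
-- stated objective: simpler
-- what changed: Replaces the mutating DFS (shared visited set and path list with append/pop backtracking) by a purely functional DFS that passes an immutable ancestor set down and builds the path back-to-front from return values.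
import Mathlib
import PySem

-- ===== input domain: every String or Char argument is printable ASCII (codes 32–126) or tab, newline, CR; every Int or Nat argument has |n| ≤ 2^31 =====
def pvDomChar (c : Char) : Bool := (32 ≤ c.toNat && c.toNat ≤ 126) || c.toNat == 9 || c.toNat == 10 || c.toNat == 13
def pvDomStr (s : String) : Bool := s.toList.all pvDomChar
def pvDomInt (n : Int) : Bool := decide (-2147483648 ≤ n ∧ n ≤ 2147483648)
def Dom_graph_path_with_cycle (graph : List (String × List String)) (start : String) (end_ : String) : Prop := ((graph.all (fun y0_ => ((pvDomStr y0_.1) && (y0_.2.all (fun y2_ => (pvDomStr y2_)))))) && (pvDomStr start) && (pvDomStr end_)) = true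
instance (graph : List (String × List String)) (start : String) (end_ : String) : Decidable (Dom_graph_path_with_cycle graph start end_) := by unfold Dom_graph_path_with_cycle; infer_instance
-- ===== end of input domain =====

-- B replaces A's mutating backtracking DFS (shared visited set + path list with append/pop)
-- by a purely functional DFS passing an immutable ancestor set down and building the path
-- back-to-front from return values (objective: simpler).

-- Fuel bound for the structural recursion: the recursion depth of the DFS is bounded by the
-- number of distinct nodes ever reachable (start, keys, all neighbours), so this fuel is never
-- exhausted; it is a termination device only, not part of either algorithm.
def pvFuelGPC (graph : List (String × List String)) (start : String) : Nat :=
  (start :: (graph.map Prod.fst ++ (graph.map Prod.snd).flatten)).length + 1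

-- ===== PORT A =====
-- dfs mutates `path` and `visited`; we thread them as state: result = (returned Bool, path, visited).
mutual
def pvDfsA (graph : List (String × List String)) (end_ : String) : Nat → String → List String → List String → Bool × List String × List String
  | 0, _, path, visited => (false, path, visited)   -- fuel guard, never reached with pvFuelGPC
  | Nat.succ fuel, node, path, visited =>
    if node = end_ then (true, path ++ [node], visited)           -- path.append(node); return True
    else if PySem.Set.contains visited node then (false, path, visited)
    else
      -- visited.add(node); path.append(node)
      match pvLoopA graph end_ fuel (PySem.Dict.getD (PySem.Dict.mk graph) node []) (path ++ [node]) (PySem.Set.add visited node) with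
      | (true, p2, v2) => (true, p2, v2)
      -- path.pop(); visited.remove(node): path is nonempty and node ∈ visited here, so
      -- dropLast = list.pop() and Set.discard = set.remove (which raises only on a missing element)
      | (false, p2, v2) => (false, p2.dropLast, PySem.Set.discard v2 node)
  termination_by fuel _ _ _ => (fuel, 0)

def pvLoopA (graph : List (String × List String)) (end_ : String) : Nat → List String → List String → List String → Bool × List String × List String
  | _, [], path, visited => (false, path, visited)
  | fuel, nb :: rest, path, visited =>
    match pvDfsA graph end_ fuel nb path visited with
    | (true, p', v') => (true, p', v')
    | (false, p', v') => pvLoopA graph end_ fuel rest p' v'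
  termination_by fuel ns _ _ => (fuel, ns.length + 1)
end

def graph_path_with_cycle (graph : List (String × List String)) (start : String) (end_ : String) : Option (List String) :=
  match pvDfsA graph end_ (pvFuelGPC graph start) start [] [] with
  | (true, p, _) => some p
  | (false, _, _) => none

-- ===== PORT B =====
mutual
def pvDfsB (graph : List (String × List String)) (end_ : String) : Nat → String → List String → Option (List String)
  | 0, _, _ => none   -- fuel guard, never reached with pvFuelGPC
  | Nat.succ fuel, node, anc =>
    if node = end_ then some [node]
    else if PySem.Set.contains anc node then none
    else
      match pvLoopB graph end_ fuel (PySem.Dict.getD (PySem.Dict.mk graph) node []) (PySem.Set.add anc node) with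
      | some r => some (node :: r)   -- [node] + r
      | none => none
  termination_by fuel _ _ => (fuel, 0)

def pvLoopB (graph : List (String × List String)) (end_ : String) : Nat → List String → List String → Option (List String)
  | _, [], _ => none
  | fuel, nb :: rest, anc =>
    match pvDfsB graph end_ fuel nb anc with
    | some r => some r
    | none => pvLoopB graph end_ fuel rest anc
  termination_by fuel ns _ => (fuel, ns.length + 1)
end

def graph_path_with_cycle_alt (graph : List (String × List String)) (start : String) (end_ : String) : Option (List String) :=
  pvDfsB graph end_ (pvFuelGPC graph start) start PySem.Set.empty

-- ===== PRECONDITION & SPEC =====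
def Spec_graph_path_with_cycle (graph : List (String × List String)) (start : String) (end_ : String) (out : Option (List String)) : Prop := out = graph_path_with_cycle_alt graph start end_
instance (graph : List (String × List String)) (start : String) (end_ : String) (out : Option (List String)) : Decidable (Spec_graph_path_with_cycle graph start end_ out) := by unfold Spec_graph_path_with_cycle; infer_instance

-- ===== CLAIM (what is proved, stated in full; the proofs are below) =====
def Claim_equal_graph_path_with_cycle : Prop := ∀ (graph : List (String × List String)) (start : String) (end_ : String), Dom_graph_path_with_cycle graph start end_ → Spec_graph_path_with_cycle graph start end_ (graph_path_with_cycle graph start end_)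

-- ===== LEMMAS AND PROOFS =====

-- The simulation invariant: with the same fuel, ancestors and Nodup visited set,
--   B returns none  ↔  A returns False with path and visited restored unchanged;
--   B returns some r ↔ A returns True with path extended by exactly r.
def pvSim (graph : List (String × List String)) (end_ : String) (fuel : Nat) : Prop :=
  ∀ (node : String) (path visited : List String), visited.Nodup →
    (pvDfsB graph end_ fuel node visited = none →
        pvDfsA graph end_ fuel node path visited = (false, path, visited)) ∧
    (∀ r, pvDfsB graph end_ fuel node visited = some r →
        ∃ v, pvDfsA graph end_ fuel node path visited = (true, path ++ r, v))

lemma pvLoop_sim (graph : List (String × List String)) (end_ : String) (fuel : Nat)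
    (ih : pvSim graph end_ fuel) :
    ∀ (ns : List String) (path visited : List String), visited.Nodup →
      (pvLoopB graph end_ fuel ns visited = none →
          pvLoopA graph end_ fuel ns path visited = (false, path, visited)) ∧
      (∀ r, pvLoopB graph end_ fuel ns visited = some r →
          ∃ v, pvLoopA graph end_ fuel ns path visited = (true, path ++ r, v)) := by
  intro ns
  induction ns with
  | nil => intro path visited _; exact ⟨fun _ => by rw [pvLoopA], fun r h => by rw [pvLoopB] at h; exact absurd h (by simp)⟩
  | cons nb rest ihrest =>
    intro path visited hnd
    rcases ih nb path visited hnd with ⟨hnone, hsome⟩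
    constructor
    · intro hB
      rw [pvLoopB] at hB
      cases hd : pvDfsB graph end_ fuel nb visited with
      | some r => rw [hd] at hB; simp at hB
      | none =>
        rw [hd] at hB; simp at hB
        rw [pvLoopA, hnone hd]
        exact (ihrest path visited hnd).1 hB
    · intro r hB
      rw [pvLoopB] at hB
      cases hd : pvDfsB graph end_ fuel nb visited with
      | some r' =>
        rw [hd] at hB
        have hrr : r' = r := by simpa using hB
        subst hrr
        rcases hsome r' hd with ⟨v, hv⟩
        exact ⟨v, by rw [pvLoopA, hv]⟩
      | none =>
        rw [hd] at hB; simp at hB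
        rw [pvLoopA, hnone hd]
        exact (ihrest path visited hnd).2 r hB

lemma pvDfs_sim (graph : List (String × List String)) (end_ : String) :
    ∀ fuel, pvSim graph end_ fuel := by
  intro fuel
  induction fuel with
  | zero => intro node path visited _; exact ⟨fun _ => by rw [pvDfsA], fun r h => by rw [pvDfsB] at h; exact absurd h (by simp)⟩
  | succ fuel ih =>
    intro node path visited hnd
    by_cases hend : node = end_
    · refine ⟨fun hB => ?_, fun r hB => ?_⟩
      · rw [pvDfsB, if_pos hend] at hB; simp at hB
      · rw [pvDfsB, if_pos hend] at hB; simp at hB; subst hB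
        exact ⟨visited, by rw [pvDfsA, if_pos hend]⟩
    · by_cases hvis : PySem.Set.contains visited node
      · refine ⟨fun _ => ?_, fun r hB => ?_⟩
        · rw [pvDfsA, if_neg hend, if_pos hvis]
        · rw [pvDfsB, if_neg hend, if_pos hvis] at hB; simp at hB
      · have hnotmem : node ∉ visited := by
          intro hm
          exact hvis ((PySem.Set.contains_iff visited node).mpr hm)
        have hadd : PySem.Set.add visited node = visited ++ [node] :=
          PySem.Set.add_of_not_mem hnotmem
        have hnd' : (PySem.Set.add visited node).Nodup := PySem.Set.nodup_add visited node hnd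
        have hloop := pvLoop_sim graph end_ fuel ih
          (PySem.Dict.getD (PySem.Dict.mk graph) node []) (path ++ [node])
          (PySem.Set.add visited node) hnd'
      -- discard (visited ++ [node]) node = visited, since node ∉ visited and visited.Nodup
        have hdisc : PySem.Set.discard (PySem.Set.add visited node) node = visited := by
          rw [hadd]
          simp [PySem.Set.discard]
          intro x hx hxe
          subst hxe; exact hnotmem hx
        refine ⟨fun hB => ?_, fun r hB => ?_⟩
        · rw [pvDfsB, if_neg hend, if_neg hvis] at hB
          cases hl : pvLoopB graph end_ fuel (PySem.Dict.getD (PySem.Dict.mk graph) node []) (PySem.Set.add visited node) with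
          | some r => rw [hl] at hB; simp at hB
          | none =>
            rw [pvDfsA, if_neg hend, if_neg hvis, hloop.1 hl]
            simp [hdisc]
        · rw [pvDfsB, if_neg hend, if_neg hvis] at hB
          cases hl : pvLoopB graph end_ fuel (PySem.Dict.getD (PySem.Dict.mk graph) node []) (PySem.Set.add visited node) with
          | none => rw [hl] at hB; simp at hB
          | some r' =>
            rw [hl] at hB; simp at hB; subst hB
            rcases hloop.2 r' hl with ⟨v, hv⟩
            refine ⟨v, ?_⟩
            rw [pvDfsA, if_neg hend, if_neg hvis, hv]
            simp

-- ===== VERDICT (by name: the statement is the Claim_ definition above) =====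
theorem graph_path_with_cycle_spec : Claim_equal_graph_path_with_cycle := by
  intro graph start end_ _
  unfold Spec_graph_path_with_cycle graph_path_with_cycle graph_path_with_cycle_alt
  rcases pvDfs_sim graph end_ (pvFuelGPC graph start) start [] [] List.nodup_nil with ⟨hnone, hsome⟩
  cases hB : pvDfsB graph end_ (pvFuelGPC graph start) start PySem.Set.empty with
  | none => rw [hnone hB]
  | some r =>
    rcases hsome r hB with ⟨v, hv⟩
    rw [hv]
    simp
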